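-- pv_equiv track=rewrite | github.com/saad-zaib/hackforge | core/mutations/identification_authentication_failures_mutation.py | _get_filter_codes
-- ===== SOURCE A (Python) =====
-- from typing import Dict, List, Any
--
-- def _get_filter_codes(filter_names: List[str]) -> List[Dict]:
--     """Convert filter names to filter code objects"""
--     filter_map = {
--         'or_1_equals_1': {
--             'type': 'or_1_equals_1',
--             'description': 'Or_1_equals_1 filtering',
--             'php_code': "$input = str_replace('o', '', $input);",
--             'python_code': "input = input.replace('o', '')",
--         },
--         'admin_admin': {
--             'type': 'admin_admin',
--             'description': 'Admin_admin filtering',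
--             'php_code': "$input = str_replace('a', '', $input);",
--             'python_code': "input = input.replace('a', '')",
--         },
--         'null_byte': {
--             'type': 'null_byte',
--             'description': 'Null_byte filtering',
--             'php_code': "$input = str_replace('n', '', $input);",
--             'python_code': "input = input.replace('n', '')",
--         },
--         'comment_bypass': {
--             'type': 'comment_bypass',
--             'description': 'Comment_bypass filtering',
--             'php_code': "$input = str_replace('c', '', $input);",
--             'python_code': "input = input.replace('c', '')",
--         },
--         'jwt_manipulation': {
--             'type': 'jwt_manipulation',
--             'description': 'Jwt_manipulation filtering',
--             'php_code': "$input = str_replace('j', '', $input);",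
--             'python_code': "input = input.replace('j', '')",
--         },
--         'session_hijacking': {
--             'type': 'session_hijacking',
--             'description': 'Session_hijacking filtering',
--             'php_code': "$input = str_replace('s', '', $input);",
--             'python_code': "input = input.replace('s', '')",
--         }
--     }
--
--     return [filter_map[f] for f in filter_names if f in filter_map]
-- ===== SOURCE B (Python) =====
-- from typing import Dict, List, Any
--
-- _VALID_FILTERS = ('or_1_equals_1', 'admin_admin', 'null_byte',
--                   'comment_bypass', 'jwt_manipulation', 'session_hijacking')
--
--
-- def _make_filter(name):
--     letter = name[:1]
--     return {
--         'type': name,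
--         'description': name.capitalize() + ' filtering',
--         'php_code': "$input = str_replace('" + letter + "', '', $input);",
--         'python_code': "input = input.replace('" + letter + "', '')",
--     }
--
--
-- def _get_filter_codes(filter_names: List[str]) -> List[Dict]:
--     """Convert filter names to filter code objects"""
--     return [_make_filter(f) for f in filter_names if f in _VALID_FILTERS]
-- ===== Notes on version B (the rewrite author's own statement) =====
-- stated objective: simpler
-- what changed: Replaces the hardcoded six-entry literal dict with a tuple of valid names plus a constructor that derives each dict from the name itself (capitalize for the description, the first letter for the replace snippets).
import Mathlib
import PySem

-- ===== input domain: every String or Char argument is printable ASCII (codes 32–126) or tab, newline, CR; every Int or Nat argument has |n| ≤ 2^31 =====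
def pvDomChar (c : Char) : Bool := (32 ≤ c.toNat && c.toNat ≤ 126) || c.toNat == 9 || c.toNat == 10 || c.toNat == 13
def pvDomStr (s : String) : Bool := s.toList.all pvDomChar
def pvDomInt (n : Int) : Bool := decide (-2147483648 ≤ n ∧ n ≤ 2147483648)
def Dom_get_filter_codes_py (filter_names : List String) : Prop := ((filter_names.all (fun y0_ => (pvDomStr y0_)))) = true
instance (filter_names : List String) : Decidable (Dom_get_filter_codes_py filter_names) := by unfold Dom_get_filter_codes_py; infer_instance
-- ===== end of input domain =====

-- B replaces A's hardcoded six-entry literal table with a tuple of valid names and a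
-- constructor deriving each dict from the name (capitalize + first letter): simpler.

-- ===== PORT A =====
-- A's dict literal 'filter_map' (insertion order preserved; values are dicts = assoc lists)
def pvFilterMap : PySem.Dict String (List (String × String)) :=
  PySem.Dict.mk
    [ ("or_1_equals_1",
        [ ("type", "or_1_equals_1"),
          ("description", "Or_1_equals_1 filtering"),
          ("php_code", "$input = str_replace('o', '', $input);"),
          ("python_code", "input = input.replace('o', '')") ]),
      ("admin_admin",
        [ ("type", "admin_admin"),
          ("description", "Admin_admin filtering"),
          ("php_code", "$input = str_replace('a', '', $input);"),
          ("python_code", "input = input.replace('a', '')") ]),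
      ("null_byte",
        [ ("type", "null_byte"),
          ("description", "Null_byte filtering"),
          ("php_code", "$input = str_replace('n', '', $input);"),
          ("python_code", "input = input.replace('n', '')") ]),
      ("comment_bypass",
        [ ("type", "comment_bypass"),
          ("description", "Comment_bypass filtering"),
          ("php_code", "$input = str_replace('c', '', $input);"),
          ("python_code", "input = input.replace('c', '')") ]),
      ("jwt_manipulation",
        [ ("type", "jwt_manipulation"),
          ("description", "Jwt_manipulation filtering"),
          ("php_code", "$input = str_replace('j', '', $input);"),
          ("python_code", "input = input.replace('j', '')") ]),
      ("session_hijacking",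
        [ ("type", "session_hijacking"),
          ("description", "Session_hijacking filtering"),
          ("php_code", "$input = str_replace('s', '', $input);"),
          ("python_code", "input = input.replace('s', '')") ]) ]

-- '[filter_map[f] for f in filter_names if f in filter_map]'
def get_filter_codes_py (filter_names : List String) : List (List (String × String)) :=
  filter_names.filterMap (fun f => PySem.Dict.get? pvFilterMap f)

-- ===== PORT B =====
-- Source B: _VALID_FILTERS tuple
def pvValidFilters : List String :=
  ["or_1_equals_1", "admin_admin", "null_byte",
   "comment_bypass", "jwt_manipulation", "session_hijacking"]

-- Source B: name[:1]  (slice, exact per Python semantics)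
-- Source B: name.capitalize() — first char uppercased, rest lowercased (exact on ASCII;
-- hand-ported over List Char since PySem has no capitalize primitive)
def pvCapitalize (s : String) : String :=
  match s.toList with
  | [] => ""
  | c :: rest => String.ofList (PySem.Chars.upper [c] ++ PySem.Chars.lower rest)

-- Source B: _make_filter
def pvMakeFilter (name : String) : List (String × String) :=
  let letter := String.ofList (PySem.Chars.slice name.toList (some 0) (some 1))
  [ ("type", name),
    ("description", pvCapitalize name ++ " filtering"),
    ("php_code", "$input = str_replace('" ++ letter ++ "', '', $input);"),
    ("python_code", "input = input.replace('" ++ letter ++ "', '')") ]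

def get_filter_codes_py_alt (filter_names : List String) : List (List (String × String)) :=
  filter_names.filterMap
    (fun f => if f ∈ pvValidFilters then some (pvMakeFilter f) else none)

-- ===== PRECONDITION & SPEC =====
def Spec_get_filter_codes_py (filter_names : List String) (out : List (List (String × String))) : Prop := out = get_filter_codes_py_alt filter_names
instance (filter_names : List String) (out : List (List (String × String))) : Decidable (Spec_get_filter_codes_py filter_names out) := by unfold Spec_get_filter_codes_py; infer_instance

-- ===== CLAIM (what is proved, stated in full; the proofs are below) =====
def Claim_equal_get_filter_codes_py : Prop := ∀ (filter_names : List String), Dom_get_filter_codes_py filter_names → Spec_get_filter_codes_py filter_names (get_filter_codes_py filter_names)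

-- ===== LEMMAS AND PROOFS =====

-- Pointwise agreement of the two per-name functions.
theorem pv_pointwise (f : String) :
    PySem.Dict.get? pvFilterMap f
      = (if f ∈ pvValidFilters then some (pvMakeFilter f) else none) := by
  by_cases h1 : f = "or_1_equals_1"; · subst h1; decide
  by_cases h2 : f = "admin_admin"; · subst h2; decide
  by_cases h3 : f = "null_byte"; · subst h3; decide
  by_cases h4 : f = "comment_bypass"; · subst h4; decide
  by_cases h5 : f = "jwt_manipulation"; · subst h5; decide
  by_cases h6 : f = "session_hijacking"; · subst h6; decide
  rw [if_neg (by simp [pvValidFilters, h1, h2, h3, h4, h5, h6])]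
  have e1 : ("or_1_equals_1" == f) = false := beq_eq_false_iff_ne.mpr (fun h => h1 h.symm)
  have e2 : ("admin_admin" == f) = false := beq_eq_false_iff_ne.mpr (fun h => h2 h.symm)
  have e3 : ("null_byte" == f) = false := beq_eq_false_iff_ne.mpr (fun h => h3 h.symm)
  have e4 : ("comment_bypass" == f) = false := beq_eq_false_iff_ne.mpr (fun h => h4 h.symm)
  have e5 : ("jwt_manipulation" == f) = false := beq_eq_false_iff_ne.mpr (fun h => h5 h.symm)
  have e6 : ("session_hijacking" == f) = false := beq_eq_false_iff_ne.mpr (fun h => h6 h.symm)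
  simp only [pvFilterMap, PySem.Dict.get?, List.find?, e1, e2, e3, e4, e5, e6]
  rfl

-- ===== VERDICT (by name: the statement is the Claim_ definition above) =====
theorem get_filter_codes_py_spec : Claim_equal_get_filter_codes_py := by
  intro filter_names _
  unfold Spec_get_filter_codes_py get_filter_codes_py get_filter_codes_py_alt
  exact List.filterMap_congr (fun f _ => pv_pointwise f)
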